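-- pv_equiv track=rewrite | github.com/hades-k/Advanced_prog | part3.py | visualize_differences_bar
-- ===== SOURCE A (Python) =====
-- def visualize_differences_bar(seq1, seq2, label1, label2):
--     """Visualize differences between two aligned sequences."""
--     matches = mismatches = gaps = 0
--     block_size = 60
--     length = len(seq1)
--     result = []
--
--     for i in range(0, length, block_size):
--         block1 = seq1[i:i+block_size]
--         block2 = seq2[i:i+block_size]
--         comp_line = ""
--
--         for a, b in zip(block1, block2):
--             if a == b and a != "-":
--                 comp_line += "*"
--                 matches += 1
--             elif a == '-' or b == '-':
--                 comp_line += " "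
--                 gaps += 1
--             else:
--                 comp_line += "|"
--                 mismatches += 1
--
--         result.append({
--             "block1": block1,
--             "block2": block2,
--             "comp_line": comp_line
--         })
--
--     summary = {
--         "matches": matches,
--         "mismatches": mismatches,
--         "gaps": gaps,
--         "total": length
--     }
--     return result, summary
-- ===== SOURCE B (Python) =====
-- def visualize_differences_bar(seq1, seq2, label1, label2):
--     """Visualize differences between two aligned sequences."""
--     comp = "".join(
--         "*" if a == b and a != "-" else (" " if a == "-" or b == "-" else "|")
--         for a, b in zip(seq1, seq2)
--     )
--     result = [
--         {"block1": seq1[i:i+60], "block2": seq2[i:i+60], "comp_line": comp[i:i+60]}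
--         for i in range(0, len(seq1), 60)
--     ]
--     summary = {
--         "matches": comp.count("*"),
--         "mismatches": comp.count("|"),
--         "gaps": comp.count(" "),
--         "total": len(seq1),
--     }
--     return result, summary
-- ===== Notes on version B (the rewrite author's own statement) =====
-- stated objective: alternative
-- what changed: B separates classification from partitioning: one pass over zip(seq1,seq2) builds the full comparison string, counts come from comp.count on that string, and the blocks are then produced by pure slicing of seq1, seq2 and comp, instead of A's interleaved per-block loop with four running counters.
import Mathlib
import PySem

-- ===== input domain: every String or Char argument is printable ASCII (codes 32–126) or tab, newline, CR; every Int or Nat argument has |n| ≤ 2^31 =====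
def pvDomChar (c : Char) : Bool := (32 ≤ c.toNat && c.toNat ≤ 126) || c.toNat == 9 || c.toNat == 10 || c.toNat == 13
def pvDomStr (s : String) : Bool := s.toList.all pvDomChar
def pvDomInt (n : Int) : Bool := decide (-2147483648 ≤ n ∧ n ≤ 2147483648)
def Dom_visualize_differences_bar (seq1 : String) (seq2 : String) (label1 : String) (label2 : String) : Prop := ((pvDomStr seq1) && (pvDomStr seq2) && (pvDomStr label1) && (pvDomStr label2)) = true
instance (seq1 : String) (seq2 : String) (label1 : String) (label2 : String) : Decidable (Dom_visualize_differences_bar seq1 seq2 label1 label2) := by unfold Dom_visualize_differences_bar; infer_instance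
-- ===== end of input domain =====

-- B separates classification from block partitioning: one pass builds the full comparison
-- string and the counts come from counting its characters, instead of A's interleaved
-- per-block loop carrying four counters (objective: alternative, same O(n) cost).

-- ===== PORT A =====
-- inner loop body of A: state (comp_line as chars, matches, mismatches, gaps), one zipped pair
def pvStepInnerA (st : List Char × Int × Int × Int) (ab : Char × Char) : List Char × Int × Int × Int :=
  if ab.1 == ab.2 && !(ab.1 == '-') then (st.1 ++ ['*'], st.2.1 + 1, st.2.2.1, st.2.2.2)
  else if ab.1 == '-' || ab.2 == '-' then (st.1 ++ [' '], st.2.1, st.2.2.1, st.2.2.2 + 1)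
  else (st.1 ++ ['|'], st.2.1, st.2.2.1 + 1, st.2.2.2)

-- outer loop body of A: state (matches, mismatches, gaps, result), block start index i
def pvStepOuterA (seq1 seq2 : String)
    (st : Int × Int × Int × List (List (String × String))) (i : Int) :
    Int × Int × Int × List (List (String × String)) :=
  let block1 := PySem.Str.slice seq1 (some i) (some (i + 60))
  let block2 := PySem.Str.slice seq2 (some i) (some (i + 60))
  let inner := (block1.toList.zip block2.toList).foldl pvStepInnerA ([], st.1, st.2.1, st.2.2.1)
  (inner.2.1, inner.2.2.1, inner.2.2.2,
    st.2.2.2 ++ [[("block1", block1), ("block2", block2), ("comp_line", String.ofList inner.1)]])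

def visualize_differences_bar (seq1 : String) (seq2 : String) (label1 : String) (label2 : String) : (List (List (String × String))) × (List (String × Int)) :=
  let length : Int := PySem.Str.len seq1
  let fin := (PySem.List.pyRange 0 length 60).foldl (pvStepOuterA seq1 seq2) (0, 0, 0, [])
  (fin.2.2.2, [("matches", fin.1), ("mismatches", fin.2.1), ("gaps", fin.2.2.1), ("total", length)])

-- ===== PORT B =====
-- classification of one zipped pair of characters ('*' match, ' ' gap, '|' mismatch)
def pvClassify (ab : Char × Char) : Char :=
  if ab.1 == ab.2 && !(ab.1 == '-') then '*'
  else if ab.1 == '-' || ab.2 == '-' then ' '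
  else '|'

-- one result dict of B, for block start i (comp is the full comparison string)
def pvBlockB (seq1 seq2 : String) (comp : List Char) (i : Int) : List (String × String) :=
  [("block1", PySem.Str.slice seq1 (some i) (some (i + 60))),
   ("block2", PySem.Str.slice seq2 (some i) (some (i + 60))),
   ("comp_line", String.ofList (PySem.List.slice comp (some i) (some (i + 60))))]

def visualize_differences_bar_alt (seq1 : String) (seq2 : String) (label1 : String) (label2 : String) : (List (List (String × String))) × (List (String × Int)) :=
  let comp : List Char := (seq1.toList.zip seq2.toList).map pvClassify
  let result := (PySem.List.pyRange 0 (PySem.Str.len seq1) 60).map (pvBlockB seq1 seq2 comp)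
  (result,
   [("matches", (comp.count '*' : Int)), ("mismatches", (comp.count '|' : Int)),
    ("gaps", (comp.count ' ' : Int)), ("total", PySem.Str.len seq1)])

-- ===== PRECONDITION & SPEC =====
def Spec_visualize_differences_bar (seq1 : String) (seq2 : String) (label1 : String) (label2 : String) (out : (List (List (String × String))) × (List (String × Int))) : Prop := out = visualize_differences_bar_alt seq1 seq2 label1 label2
instance (seq1 : String) (seq2 : String) (label1 : String) (label2 : String) (out : (List (List (String × String))) × (List (String × Int))) : Decidable (Spec_visualize_differences_bar seq1 seq2 label1 label2 out) := by unfold Spec_visualize_differences_bar; infer_instance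

-- ===== CLAIM (what is proved, stated in full; the proofs are below) =====
def Claim_equal_visualize_differences_bar : Prop := ∀ (seq1 : String) (seq2 : String) (label1 : String) (label2 : String), Dom_visualize_differences_bar seq1 seq2 label1 label2 → Spec_visualize_differences_bar seq1 seq2 label1 label2 (visualize_differences_bar seq1 seq2 label1 label2)

-- ===== LEMMAS AND PROOFS =====

-- zip commutes with take and with drop
theorem pv_zip_take {α : Type} (xs ys : List α) (n : ℕ) :
    (xs.take n).zip (ys.take n) = (xs.zip ys).take n := by
  induction xs generalizing ys n with
  | nil => simp
  | cons x xs ih =>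
    cases ys with
    | nil => simp
    | cons y ys =>
      cases n with
      | zero => simp
      | succ n => simp [ih]

theorem pv_zip_drop {α : Type} (xs ys : List α) (n : ℕ) :
    (xs.drop n).zip (ys.drop n) = (xs.zip ys).drop n := by
  induction n generalizing xs ys with
  | zero => simp
  | succ n ih =>
    cases xs with
    | nil => simp
    | cons x xs =>
      cases ys with
      | nil => simp
      | cons y ys => simpa using ih xs ys

-- a slice xs[i:i+60] at a natural start is take 60 of drop i
theorem pv_slice_i60 {α : Type} (xs : List α) (i : ℕ) :
    PySem.List.slice xs (some (i : Int)) (some ((i : Int) + 60)) = (xs.drop i).take 60 := by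
  have h := PySem.List.slice_natCast_add xs i 60
  simpa using h

-- A's inner fold appends the classified characters and adds their counts
theorem pv_inner_fold (ps : List (Char × Char)) (cl : List Char) (m mm g : Int) :
    ps.foldl pvStepInnerA (cl, m, mm, g) =
      (cl ++ ps.map pvClassify,
       m + ((ps.map pvClassify).count '*' : Int),
       mm + ((ps.map pvClassify).count '|' : Int),
       g + ((ps.map pvClassify).count ' ' : Int)) := by
  induction ps generalizing cl m mm g with
  | nil => simp
  | cons p ps ih =>
    simp only [List.foldl_cons, List.map_cons]
    rw [pvStepInnerA, pvClassify]
    split_ifs <;> simp [ih, Prod.mk.injEq] <;> omega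

-- the cons step of range(i, n, 60)
theorem pv_pyRange60_cons (a b : Int) (h : a < b) :
    PySem.List.pyRange a b 60 = a :: PySem.List.pyRange (a + 60) b 60 := by
  rw [PySem.List.pyRange_of_pos a b (by norm_num), PySem.List.pyRange_of_pos (a + 60) b (by norm_num)]
  have hcount : (if a < b then ((b - a + 60 - 1) / 60).toNat else 0) =
      (if a + 60 < b then ((b - (a + 60) + 60 - 1) / 60).toNat else 0) + 1 := by
    split_ifs <;> omega
  rw [hcount, List.range_succ_eq_map]
  simp only [List.map_cons, List.map_map, Nat.cast_zero, mul_zero, add_zero]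
  congr 1
  apply List.map_congr_left
  intro k _
  simp only [Function.comp_apply, Nat.succ_eq_add_one]
  push_cast
  ring

theorem pv_pyRange60_nil (a b : Int) (h : b ≤ a) :
    PySem.List.pyRange a b 60 = [] := by
  rw [PySem.List.pyRange_of_pos a b (by norm_num)]
  have hnl : ¬ a < b := not_lt.mpr h
  simp [hnl]

-- main outer-loop invariant: folding A's outer step over range(i, len seq1, 60)
-- adds the counts of the remaining part of comp and appends B's remaining blocks
theorem pv_outer (seq1 seq2 : String) (d : ℕ) :
    ∀ (i : ℕ) (m mm g : Int) (res : List (List (String × String))),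
    seq1.toList.length ≤ i + d →
    (PySem.List.pyRange (i : Int) (seq1.toList.length : Int) 60).foldl
        (pvStepOuterA seq1 seq2) (m, mm, g, res) =
      (m + ((((seq1.toList.zip seq2.toList).map pvClassify).drop i).count '*' : Int),
       mm + ((((seq1.toList.zip seq2.toList).map pvClassify).drop i).count '|' : Int),
       g + ((((seq1.toList.zip seq2.toList).map pvClassify).drop i).count ' ' : Int),
       res ++ (PySem.List.pyRange (i : Int) (seq1.toList.length : Int) 60).map
         (pvBlockB seq1 seq2 ((seq1.toList.zip seq2.toList).map pvClassify))) := by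
  set comp := (seq1.toList.zip seq2.toList).map pvClassify with hcomp
  have hcl : comp.length ≤ seq1.toList.length := by
    rw [hcomp]; simp [List.length_zip]
  induction d with
  | zero =>
    intro i m mm g res hle
    rw [pv_pyRange60_nil _ _ (by exact_mod_cast (by omega : seq1.toList.length ≤ i))]
    have hd : comp.drop i = [] := List.drop_eq_nil_of_le (by omega)
    simp [hd]
  | succ d ih =>
    intro i m mm g res hle
    by_cases hi : i < seq1.toList.length
    · rw [pv_pyRange60_cons _ _ (by exact_mod_cast hi)]
      simp only [List.foldl_cons, List.map_cons]
      have hblock : pvStepOuterA seq1 seq2 (m, mm, g, res) (i : Int) =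
          (m + (((comp.drop i).take 60).count '*' : Int),
           mm + (((comp.drop i).take 60).count '|' : Int),
           g + (((comp.drop i).take 60).count ' ' : Int),
           res ++ [pvBlockB seq1 seq2 comp (i : Int)]) := by
        rw [pvStepOuterA]
        simp only [PySem.Str.toList_slice, PySem.Chars.slice_eq_listSlice, pv_slice_i60,
          pv_zip_take, pv_zip_drop, pv_inner_fold]
        rw [pvBlockB, hcomp]
        simp [List.map_take, List.map_drop, pv_slice_i60]
      rw [hblock]
      have hsum : ((i : Int) + 60) = ((i + 60 : ℕ) : Int) := by push_cast; ring
      rw [hsum, ih (i + 60) _ _ _ _ (by omega)]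
      have hsplit : comp.drop i = (comp.drop i).take 60 ++ comp.drop (i + 60) := by
        conv_lhs => rw [← List.take_append_drop 60 (comp.drop i)]
        rw [List.drop_drop]
      have hc : ∀ c : Char, List.count c (comp.drop i) =
          List.count c ((comp.drop i).take 60) + List.count c (comp.drop (i + 60)) := by
        intro c
        conv_lhs => rw [hsplit]
        exact List.count_append
      simp only [Prod.mk.injEq]
      refine ⟨?_, ?_, ?_, ?_⟩
      · rw [hc '*']; push_cast; ring
      · rw [hc '|']; push_cast; ring
      · rw [hc ' ']; push_cast; ring
      · simp
    · rw [pv_pyRange60_nil _ _ (by exact_mod_cast (by omega : seq1.toList.length ≤ i))]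
      have hd : comp.drop i = [] := List.drop_eq_nil_of_le (by omega)
      simp [hd]

-- ===== VERDICT (by name: the statement is the Claim_ definition above) =====
theorem visualize_differences_bar_spec : Claim_equal_visualize_differences_bar := by
  intro seq1 seq2 label1 label2 _
  unfold Spec_visualize_differences_bar visualize_differences_bar visualize_differences_bar_alt
  have h0 := pv_outer seq1 seq2 seq1.toList.length 0 0 0 0 [] (by omega)
  simp only [Nat.cast_zero, List.drop_zero, List.nil_append] at h0
  simp only [PySem.Str.len_eq, h0]
  simp
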